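-- pv_equiv track=rewrite | github.com/newolfsociety/Cryptographic-Tool | KeywordCipher.py | Keyword_key_main
-- ===== SOURCE A (Python) =====
-- def Keyword_key_main(key):
--     keyf = ''
--     for i in key:
--         if i not in keyf:
--             keyf += i
--     for i in range(126, 31, -1):
--         if chr(i) not in keyf:
--             keyf += chr(i)
--     return keyf
-- ===== SOURCE B (Python) =====
-- def Keyword_key_main(key):
--     # Rank-and-sort: assign every candidate character a numeric rank
--     # (its first-occurrence position in the key, or a descending-ordinal
--     # rank after the key block) and sort the candidate pool once by rank.
--     order = {c: i for i, c in enumerate(dict.fromkeys(key))}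
--     pool = set(key) | {chr(i) for i in range(32, 127)}
--     return ''.join(sorted(pool, key=lambda c: order.get(c, len(order) + 126 - ord(c))))
-- ===== Notes on version B (the rewrite author's own statement) =====
-- stated objective: alternative
-- what changed: A appends characters one by one, scanning the growing result for membership; B instead assigns every candidate character a numeric rank (first-occurrence position in the key, or a descending-ordinal rank past the key block) and sorts the candidate pool once by that rank.
import Mathlib
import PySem

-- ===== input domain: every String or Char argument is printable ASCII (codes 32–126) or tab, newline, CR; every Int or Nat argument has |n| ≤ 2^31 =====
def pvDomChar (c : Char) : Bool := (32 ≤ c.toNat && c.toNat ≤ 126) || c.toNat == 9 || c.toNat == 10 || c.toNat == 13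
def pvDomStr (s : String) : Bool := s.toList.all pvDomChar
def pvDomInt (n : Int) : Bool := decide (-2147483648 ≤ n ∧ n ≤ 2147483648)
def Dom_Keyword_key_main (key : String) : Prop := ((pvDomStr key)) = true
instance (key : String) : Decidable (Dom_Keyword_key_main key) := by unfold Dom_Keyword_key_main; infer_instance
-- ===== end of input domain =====

set_option maxRecDepth 10000


-- B replaces A's accumulate-with-membership-scan construction by a rank-and-sort scheme:
-- each candidate character gets a numeric rank and the candidate pool is sorted once by it.

-- ===== PORT A =====
-- literal port: keyf is the accumulated string as a char list; chr(i) = Char.ofNat i.toNat (exact for i in 32..126)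
def Keyword_key_main (key : String) : String :=
  let keyf := key.toList.foldl (fun keyf i => if i ∈ keyf then keyf else keyf ++ [i]) []
  let keyf := (PySem.List.pyRange 126 31 (-1)).foldl
    (fun keyf i => if Char.ofNat i.toNat ∈ keyf then keyf else keyf ++ [Char.ofNat i.toNat]) keyf
  String.mk keyf

-- ===== PORT B =====
-- order = {c: i for i, c in enumerate(dict.fromkeys(key))}; pool = set(key) | {chr(i) for i in range(32,127)};
-- ''.join(sorted(pool, key=lambda c: order.get(c, len(order) + 126 - ord(c))))
def Keyword_key_main_alt (key : String) : String :=
  let order : PySem.Dict Char Int :=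
    (PySem.List.enumerate (PySem.List.dedup key.toList) 0).foldl
      (fun d p => d.insert p.2 p.1) PySem.Dict.empty
  let pool := PySem.Set.union (PySem.Set.ofList key.toList)
      (PySem.Set.ofList ((PySem.List.pyRange 32 127 1).map (fun i => Char.ofNat i.toNat)))
  String.mk (PySem.List.sorted pool
    (fun c => (order.get? c).getD ((order.size : Int) + 126 - (c.toNat : Int))) false)

-- ===== PRECONDITION & SPEC =====
def Spec_Keyword_key_main (key : String) (out : String) : Prop := out = Keyword_key_main_alt key
instance (key : String) (out : String) : Decidable (Spec_Keyword_key_main key out) := by unfold Spec_Keyword_key_main; infer_instance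

-- ===== CLAIM (what is proved, stated in full; the proofs are below) =====
def Claim_equal_Keyword_key_main : Prop := ∀ (key : String), Dom_Keyword_key_main key → Spec_Keyword_key_main key (Keyword_key_main key)

-- ===== LEMMAS AND PROOFS =====

-- chr is injective on the printable range
lemma chr_inj_printable {i j : Int} (hi : 32 ≤ i ∧ i ≤ 126) (hj : 32 ≤ j ∧ j ≤ 126)
    (hne : i ≠ j) : Char.ofNat i.toNat ≠ Char.ofNat j.toNat := by
  intro h
  have hvi : i.toNat.isValidChar := Or.inl (by omega)
  have hvj : j.toNat.isValidChar := Or.inl (by omega)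
  have := congrArg Char.toNat h
  rw [Char.toNat_ofNat, Char.toNat_ofNat, if_pos hvi, if_pos hvj] at this
  omega

-- ord(chr(i)) = i on the printable range
lemma toNat_chr {i : Int} (hi : 32 ≤ i ∧ i ≤ 126) : ((Char.ofNat i.toNat).toNat : Int) = i := by
  have hv : i.toNat.isValidChar := Or.inl (by omega)
  rw [Char.toNat_ofNat, if_pos hv]
  omega

-- A's first loop is the order-preserving dedup
lemma first_loop_eq_dedup (key : String) :
    key.toList.foldl (fun keyf i => if i ∈ keyf then keyf else keyf ++ [i]) []
      = PySem.List.dedup key.toList := by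
  rw [PySem.List.dedup, PySem.Set.ofList_eq_foldl]
  congr 1
  funext a b
  simp [PySem.Set.add]

-- A's second loop over a strictly decreasing printable list appends exactly the new chars
lemma second_loop_eq_filter (l : List Int) (acc : List Char)
    (hdec : l.Pairwise (· > ·)) (hbd : ∀ i ∈ l, 32 ≤ i ∧ i ≤ 126) :
    l.foldl (fun keyf i => if Char.ofNat i.toNat ∈ keyf then keyf else keyf ++ [Char.ofNat i.toNat]) acc
      = acc ++ (l.filter (fun i => !decide (Char.ofNat i.toNat ∈ acc))).map (fun i => Char.ofNat i.toNat) := by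
  induction l generalizing acc with
  | nil => simp
  | cons i l ih =>
    have hi := hbd i (List.mem_cons_self)
    have hdec' := (List.pairwise_cons.mp hdec)
    by_cases hm : Char.ofNat i.toNat ∈ acc
    · simp only [List.foldl_cons, List.filter_cons, hm, decide_true, Bool.not_true, if_true]
      exact ih acc hdec'.2 (fun j hj => hbd j (List.mem_cons_of_mem _ hj))
    · simp only [List.foldl_cons, List.filter_cons, hm, decide_false, Bool.not_false, if_true,
        if_false]
      rw [ih (acc ++ [Char.ofNat i.toNat]) hdec'.2 (fun j hj => hbd j (List.mem_cons_of_mem _ hj))]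
      have hfe : (l.filter (fun j => !decide (Char.ofNat j.toNat ∈ acc ++ [Char.ofNat i.toNat])))
          = l.filter (fun j => !decide (Char.ofNat j.toNat ∈ acc)) := by
        refine List.filter_congr (fun j hj => ?_)
        have hji : j ≠ i := fun h => absurd (h ▸ hdec'.1 j hj) (lt_irrefl _)
        have : Char.ofNat j.toNat ≠ Char.ofNat i.toNat :=
          chr_inj_printable (hbd j (List.mem_cons_of_mem _ hj)) hi hji
        simp [List.mem_append, this]
      rw [hfe]
      simp

-- B's rank dictionary (proof-only name for the dict B's port builds)
def kkmBuild (l : List Char) : PySem.Dict Char Int :=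
  (PySem.List.enumerate l 0).foldl (fun d p => d.insert p.2 p.1) PySem.Dict.empty

lemma kkmBuild_items (l : List Char) (h : l.Nodup) :
    (kkmBuild l).items = (PySem.List.enumerate l 0).map (fun p => (p.2, p.1)) := by
  unfold kkmBuild
  rw [PySem.Dict.items_foldl_insert_fresh (PySem.List.enumerate l 0) (fun p => p.2) (fun p => p.1)
      PySem.Dict.empty (fun a _ => PySem.Dict.contains_empty _)
      (by rw [PySem.List.map_snd_enumerate]; exact h)]
  simp [PySem.Dict.empty]

lemma kkmBuild_keys (l : List Char) (h : l.Nodup) : (kkmBuild l).keys = l := by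
  show (kkmBuild l).items.map (·.1) = l
  rw [kkmBuild_items l h, List.map_map]
  exact PySem.List.map_snd_enumerate l 0

lemma kkmBuild_size (l : List Char) (h : l.Nodup) : (kkmBuild l).size = l.length := by
  show (kkmBuild l).items.length = l.length
  rw [kkmBuild_items l h, List.length_map, PySem.List.length_enumerate]

lemma kkmBuild_get_mem (l : List Char) (h : l.Nodup) (p : Nat) (hp : p < l.length) :
    (kkmBuild l).get? l[p] = some (p : Int) := by
  apply PySem.Dict.get?_of_mem_items
  · rw [kkmBuild_items l h]
    refine List.mem_map.mpr ⟨((p : Int), l[p]), ?_, rfl⟩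
    exact (PySem.List.mem_enumerate_iff _ _ _).mpr ⟨p, hp, by simp⟩
  · rw [kkmBuild_keys l h]; exact h

lemma kkmBuild_get_not_mem (l : List Char) (h : l.Nodup) (c : Char) (hc : c ∉ l) :
    (kkmBuild l).get? c = none := by
  rw [PySem.Dict.get?_eq_none_iff_not_mem_keys, kkmBuild_keys l h]
  exact hc

-- the sort B performs produces exactly dedup(key) followed by the new printable chars descending
lemma sorted_pool_eq (key : String) :
    PySem.List.sorted
      (PySem.Set.union (PySem.Set.ofList key.toList)
        (PySem.Set.ofList ((PySem.List.pyRange 32 127 1).map (fun i => Char.ofNat i.toNat))))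
      (fun c => ((kkmBuild (PySem.List.dedup key.toList)).get? c).getD
        (((kkmBuild (PySem.List.dedup key.toList)).size : Int) + 126 - (c.toNat : Int))) false
    = PySem.List.dedup key.toList
      ++ ((PySem.List.pyRange 126 31 (-1)).filter
            (fun i => !decide (Char.ofNat i.toNat ∈ PySem.List.dedup key.toList))).map
          (fun i => Char.ofNat i.toNat) := by
  set ded := PySem.List.dedup key.toList with hded
  have hnd : ded.Nodup := PySem.List.nodup_dedup _
  set m := ded.length with hm
  set fl := (PySem.List.pyRange 126 31 (-1)).filter
      (fun i => !decide (Char.ofNat i.toNat ∈ ded)) with hfl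
  have hflmem : ∀ i ∈ fl, (31 < i ∧ i ≤ 126) ∧ Char.ofNat i.toNat ∉ ded := by
    intro i hi
    have h1 := List.mem_of_mem_filter hi
    have h2 := List.of_mem_filter hi
    refine ⟨PySem.List.mem_pyRange_neg_one.mp h1, by simpa using h2⟩
  have hflpair : fl.Pairwise (· > ·) := by
    apply List.Pairwise.filter
    rw [PySem.List.pyRange_neg_one_eq_reverse]
    simpa [List.pairwise_reverse] using PySem.List.pairwise_lt_pyRange_one 32 127
  set rank : Char → Int := fun c => ((kkmBuild ded).get? c).getD
        (((kkmBuild ded).size : Int) + 126 - (c.toNat : Int)) with hrank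
  have hsize : (kkmBuild ded).size = m := kkmBuild_size ded hnd
  have hrank_mem : ∀ (p : Nat) (hp : p < m), rank ded[p] = (p : Int) := by
    intro p hp
    simp [hrank, kkmBuild_get_mem ded hnd p hp]
  have hrank_tail : ∀ i ∈ fl, rank (Char.ofNat i.toNat) = (m : Int) + 126 - i := by
    intro i hi
    obtain ⟨hb, hn⟩ := hflmem i hi
    simp [hrank, kkmBuild_get_not_mem ded hnd _ hn, hsize, toNat_chr ⟨by omega, hb.2⟩]
  apply PySem.List.sorted_eq_of_perm_of_pairwise_lt
  · -- B's pool is a permutation of A's result list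
    refine (List.perm_ext_iff_of_nodup ?_ ?_).mpr ?_
    · refine List.Nodup.append hnd ?_ ?_
      · refine List.Nodup.map_on ?_ ?_
        · intro x hx y hy hxy
          by_contra hne
          obtain ⟨⟨hx1, hx2⟩, -⟩ := hflmem x hx
          obtain ⟨⟨hy1, hy2⟩, -⟩ := hflmem y hy
          exact chr_inj_printable ⟨by omega, hx2⟩ ⟨by omega, hy2⟩ hne hxy
        · exact List.Pairwise.imp (fun h => ne_of_gt h) hflpair
      · intro a ha hb
        obtain ⟨i, hi, rfl⟩ := List.mem_map.mp hb
        exact (hflmem i hi).2 ha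
    · exact PySem.Set.nodup_union _ _ (PySem.Set.nodup_ofList _)
    · intro c
      rw [List.mem_append, PySem.Set.mem_union, PySem.Set.mem_ofList, PySem.Set.mem_ofList]
      have hprint : c ∈ (PySem.List.pyRange 32 127 1).map (fun i => Char.ofNat i.toNat)
          ↔ 32 ≤ (c.toNat : Int) ∧ (c.toNat : Int) ≤ 126 := by
        constructor
        · rintro h
          obtain ⟨i, hi, rfl⟩ := List.mem_map.mp h
          have hb := PySem.List.mem_pyRange_one.mp hi
          rw [toNat_chr ⟨hb.1, by omega⟩]
          omega
        · rintro ⟨h1, h2⟩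
          refine List.mem_map.mpr ⟨(c.toNat : Int), PySem.List.mem_pyRange_one.mpr ⟨h1, by omega⟩, ?_⟩
          simp [Char.ofNat_toNat]
      have htail : c ∈ fl.map (fun i => Char.ofNat i.toNat)
          ↔ (32 ≤ (c.toNat : Int) ∧ (c.toNat : Int) ≤ 126) ∧ c ∉ ded := by
        constructor
        · intro h
          obtain ⟨i, hi, rfl⟩ := List.mem_map.mp h
          obtain ⟨hb, hn⟩ := hflmem i hi
          rw [toNat_chr ⟨by omega, hb.2⟩]
          exact ⟨⟨by omega, hb.2⟩, hn⟩
        · rintro ⟨⟨h1, h2⟩, hn⟩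
          refine List.mem_map.mpr ⟨(c.toNat : Int), ?_, by simp [Char.ofNat_toNat]⟩
          rw [hfl, List.mem_filter]
          constructor
          · exact PySem.List.mem_pyRange_neg_one.mpr ⟨by omega, h2⟩
          · simpa [Char.ofNat_toNat] using hn
      rw [htail, hprint, hded, PySem.List.mem_dedup]
      by_cases hc : c ∈ key.toList <;> simp [hc]
  · -- the target list is strictly increasing under B's rank
    rw [List.pairwise_append]
    refine ⟨?_, ?_, ?_⟩
    · rw [List.pairwise_iff_getElem]
      intro i j hi hj hij
      rw [hrank_mem i hi, hrank_mem j hj]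
      exact_mod_cast hij
    · rw [List.pairwise_map]
      have := List.Pairwise.and_mem.mp hflpair
      refine this.imp ?_
      rintro a b ⟨ha, hb, hab⟩
      rw [hrank_tail a ha, hrank_tail b hb]
      omega
    · intro a ha b hb
      obtain ⟨p, hp, rfl⟩ := List.mem_iff_getElem.mp ha
      obtain ⟨i, hi, rfl⟩ := List.mem_map.mp hb
      rw [hrank_mem p hp, hrank_tail i hi]
      have := (hflmem i hi).1
      omega

-- ===== VERDICT (by name: the statement is the Claim_ definition above) =====
theorem Keyword_key_main_spec : Claim_equal_Keyword_key_main := by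
  intro key _
  unfold Spec_Keyword_key_main Keyword_key_main Keyword_key_main_alt
  dsimp only
  rw [first_loop_eq_dedup]
  rw [second_loop_eq_filter _ _
    (by rw [PySem.List.pyRange_neg_one_eq_reverse]
        simpa [List.pairwise_reverse] using PySem.List.pairwise_lt_pyRange_one 32 127)
    (fun i hi => by rw [PySem.List.mem_pyRange_neg_one] at hi; omega)]
  rw [show ((PySem.List.enumerate (PySem.List.dedup key.toList) 0).foldl
        (fun d p => d.insert p.2 p.1) PySem.Dict.empty)
      = kkmBuild (PySem.List.dedup key.toList) from rfl]
  rw [sorted_pool_eq key]
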